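-- pv_equiv track=rewrite | github.com/Brakau-TD/small_scripts | sudoku.py | clean_up_boxes
-- ===== SOURCE A (Python) =====
-- def clean_up_boxes(my_sudoku: list):
--     '''finds identical numbers in the sudoku and replaces them with 0'''
--     board = my_sudoku.copy()
--     for l,line in enumerate(my_sudoku):
--         for i,item in enumerate(line):
--             if line.count(item) > 1:
--                 board[l][i] = 0
--             else:
--                 continue
--     return board
-- ===== SOURCE B (Python) =====
-- def clean_up_boxes(my_sudoku: list):
--     '''finds identical numbers in the sudoku and replaces them with 0'''
--     board = my_sudoku.copy()
--     for row in board: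
--         seen = set()
--         for i in range(len(row) - 1, -1, -1):
--             if row[i] in seen:
--                 row[i] = 0
--             else:
--                 seen.add(row[i])
--     return board
-- ===== Notes on version B (the rewrite author's own statement) =====
-- stated objective: faster
-- what changed: Replaces the per-cell line.count scan (quadratic per row, relying on mid-loop mutation) by a single right-to-left pass per row with a seen-set that zeroes any cell whose value occurs again later; the shallow copy and in-place mutation of the inner lists are preserved.
import Mathlib
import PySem

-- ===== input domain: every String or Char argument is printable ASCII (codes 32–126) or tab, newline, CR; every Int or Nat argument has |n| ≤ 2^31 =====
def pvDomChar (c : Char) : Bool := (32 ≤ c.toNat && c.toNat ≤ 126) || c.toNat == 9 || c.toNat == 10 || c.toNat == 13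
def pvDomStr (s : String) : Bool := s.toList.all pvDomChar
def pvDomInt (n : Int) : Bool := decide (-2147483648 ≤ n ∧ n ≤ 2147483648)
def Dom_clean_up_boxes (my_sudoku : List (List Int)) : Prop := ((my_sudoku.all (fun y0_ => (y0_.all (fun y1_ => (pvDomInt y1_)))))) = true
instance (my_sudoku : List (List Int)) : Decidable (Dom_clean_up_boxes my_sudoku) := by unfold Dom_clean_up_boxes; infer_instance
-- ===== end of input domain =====

-- B replaces A's per-cell line.count scans (quadratic per row, reading the mid-loop mutation)
-- by one right-to-left pass per row with a seen-set (faster, linear per row); equivalence is about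
-- the RETURN value — both Pythons mutate the argument's inner lists in place through the shallow copy.

-- ===== PORT A =====
-- one step of A's inner loop: item = line[i] read from the CURRENT (mutated) row, exactly as
-- Python's enumerate over the list being mutated yields it; board[l] aliases line, so the
-- count and the write both act on the same row value.
def pvStepA (cur : List Int) (i : Nat) : List Int :=
  match cur[i]? with
  | some item => if 1 < PySem.List.count cur item then cur.set i 0 else cur
  | none => cur

-- A's inner 'for i,item in enumerate(line)' over the row being mutated (row length never changes)
def pvRowA (line : List Int) : List Int :=
  (List.range line.length).foldl pvStepA line

-- board = my_sudoku.copy(): board[l] is my_sudoku[l] itself; the outer loop cleans each row once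
def clean_up_boxes (my_sudoku : List (List Int)) : List (List Int) :=
  my_sudoku.map pvRowA

-- ===== PORT B =====
-- B's reverse index loop with a seen-set, as a foldr (rightmost cell processed first);
-- the state is (seen, cleaned tail)
def pvFoldB (line : List Int) : PySem.Set Int × List Int :=
  line.foldr
    (fun v (p : PySem.Set Int × List Int) =>
      if PySem.Set.contains p.1 v then (p.1, (0 : Int) :: p.2)
      else (PySem.Set.add p.1 v, v :: p.2))
    (PySem.Set.empty, [])

def pvRowB (line : List Int) : List Int :=
  (pvFoldB line).2

def clean_up_boxes_alt (my_sudoku : List (List Int)) : List (List Int) :=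
  my_sudoku.map pvRowB

-- ===== PRECONDITION & SPEC =====
def Spec_clean_up_boxes (my_sudoku : List (List Int)) (out : List (List Int)) : Prop := out = clean_up_boxes_alt my_sudoku
instance (my_sudoku : List (List Int)) (out : List (List Int)) : Decidable (Spec_clean_up_boxes my_sudoku out) := by unfold Spec_clean_up_boxes; infer_instance

-- ===== CLAIM (what is proved, stated in full; the proofs are below) =====
def Claim_equal_clean_up_boxes : Prop := ∀ (my_sudoku : List (List Int)), Dom_clean_up_boxes my_sudoku → Spec_clean_up_boxes my_sudoku (clean_up_boxes my_sudoku)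

-- ===== LEMMAS AND PROOFS =====

-- the common characterisation: a cell is zeroed iff its value occurs again later in the row
def pvSpec : List Int → List Int
  | [] => []
  | v :: rest => (if v ∈ rest then 0 else v) :: pvSpec rest

-- pvSpec of a prefix relative to the remaining suffix of the row
def pvSpecWith : List Int → List Int → List Int
  | [], _ => []
  | v :: rest, suf => (if v ∈ rest ++ suf then 0 else v) :: pvSpecWith rest suf

lemma length_pvSpecWith (pre suf : List Int) : (pvSpecWith pre suf).length = pre.length := by
  induction pre generalizing suf with
  | nil => rfl
  | cons v rest ih => simp [pvSpecWith, ih]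

lemma mem_pvSpecWith_ne_zero {u : Int} {pre suf : List Int}
    (hu : u ∈ pvSpecWith pre suf) (h0 : u ≠ 0) : u ∉ suf := by
  induction pre generalizing suf with
  | nil => simp [pvSpecWith] at hu
  | cons v rest ih =>
    simp only [pvSpecWith, List.mem_cons] at hu
    rcases hu with hu | hu
    · split at hu
      · exact absurd hu h0
      · subst hu
        next hmem => exact fun hs => hmem (List.mem_append.2 (Or.inr hs))
    · exact ih hu

lemma pvSpecWith_append_singleton (pre : List Int) (v : Int) (suf : List Int) :
    pvSpecWith (pre ++ [v]) suf = pvSpecWith pre (v :: suf) ++ [if v ∈ suf then 0 else v] := by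
  induction pre generalizing suf with
  | nil => simp [pvSpecWith]
  | cons u rest ih =>
    simp only [List.cons_append, pvSpecWith, ih, List.mem_append, List.mem_cons]
    have h : (u ∈ rest ∨ u = v ∨ u ∈ ([] : List Int)) ∨ u ∈ suf ↔ u ∈ rest ∨ u = v ∨ u ∈ suf := by
      simp [or_assoc]
    rw [if_congr h rfl rfl]

-- one step of A on a row split as (cleaned prefix) ++ (untouched suffix), at the split point
lemma pvStepA_at_split (pre suf : List Int) (v : Int) :
    pvStepA (pvSpecWith pre (v :: suf) ++ v :: suf) pre.length
      = pvSpecWith (pre ++ [v]) suf ++ suf := by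
  have hlen : (pvSpecWith pre (v :: suf)).length = pre.length := length_pvSpecWith _ _
  set P := pvSpecWith pre (v :: suf) with hP
  have hget : (P ++ v :: suf)[pre.length]? = some v := by
    rw [← hlen]
    simp
  have hset : (P ++ v :: suf).set pre.length 0 = P ++ 0 :: suf := by
    rw [← hlen]; simp
  rw [pvSpecWith_append_singleton, ← hP]
  unfold pvStepA
  rw [hget]
  simp only [PySem.List.count_eq, List.count_append, List.count_cons_self]
  by_cases hv : v ∈ suf
  · have : 0 < List.count v suf := List.count_pos_iff.2 hv
    rw [if_pos (by omega), hset, if_pos hv]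
    simp
  · have hsuf : List.count v suf = 0 := List.count_eq_zero.2 hv
    rw [if_neg hv]
    by_cases hP0 : 0 < List.count v P
    · have hvP : v ∈ P := List.count_pos_iff.1 hP0
      have hv0 : v = 0 := by
        by_contra h
        exact (mem_pvSpecWith_ne_zero hvP h) (List.mem_cons_self)
      rw [if_pos (by omega), hset, hv0]
      simp
    · rw [if_neg (by omega)]
      simp

-- A's inner loop, run from the split point, finishes cleaning the suffix
lemma pvRowA_main (suf : List Int) : ∀ pre : List Int,
    (List.range' pre.length suf.length).foldl pvStepA (pvSpecWith pre suf ++ suf)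
      = pvSpecWith pre suf ++ pvSpec suf := by
  induction suf with
  | nil => intro pre; simp [pvSpec]
  | cons v rest ih =>
    intro pre
    rw [List.length_cons, List.range'_succ, List.foldl_cons, pvStepA_at_split pre rest v]
    have h1 : pre.length + 1 = (pre ++ [v]).length := by simp
    rw [h1, ih (pre ++ [v]), pvSpecWith_append_singleton]
    simp [pvSpec]

lemma pvRowA_eq_pvSpec (line : List Int) : pvRowA line = pvSpec line := by
  have h := pvRowA_main line []
  simpa [pvRowA, pvSpecWith, List.range_eq_range'] using h

-- B side: the foldr state is (set of values seen to the right, cleaned tail)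
lemma pvFoldB_cons (v : Int) (rest : List Int) :
    pvFoldB (v :: rest) =
      if PySem.Set.contains (pvFoldB rest).1 v then ((pvFoldB rest).1, (0 : Int) :: (pvFoldB rest).2)
      else (PySem.Set.add (pvFoldB rest).1 v, v :: (pvFoldB rest).2) := rfl

lemma pvFoldB_spec (line : List Int) :
    (pvFoldB line).2 = pvSpec line ∧ ∀ u : Int, u ∈ (pvFoldB line).1 ↔ u ∈ line := by
  induction line with
  | nil => simp [pvFoldB, pvSpec, PySem.Set.empty]
  | cons v rest ih =>
    obtain ⟨ih2, ih1⟩ := ih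
    by_cases hv : v ∈ rest
    · have hcv : PySem.Set.contains (pvFoldB rest).1 v = true :=
        (PySem.Set.contains_iff _ _).2 ((ih1 v).2 hv)
      rw [pvFoldB_cons, hcv, if_pos rfl]
      refine ⟨by simp [pvSpec, hv, ih2], fun u => ?_⟩
      rw [ih1 u, List.mem_cons]
      exact ⟨Or.inr, fun h => h.elim (fun he => he ▸ hv) id⟩
    · have hcv : PySem.Set.contains (pvFoldB rest).1 v = false := by
        cases hc : PySem.Set.contains (pvFoldB rest).1 v
        · rfl
        · exact absurd ((ih1 v).1 ((PySem.Set.contains_iff _ _).1 hc)) hv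
      rw [pvFoldB_cons, hcv, if_neg (by simp)]
      refine ⟨by simp [pvSpec, hv, ih2], fun u => ?_⟩
      rw [PySem.Set.mem_add, ih1 u, List.mem_cons, or_comm]

lemma pvRowB_eq_pvSpec (line : List Int) : pvRowB line = pvSpec line :=
  (pvFoldB_spec line).1

-- ===== VERDICT (by name: the statement is the Claim_ definition above) =====
theorem clean_up_boxes_spec : Claim_equal_clean_up_boxes := by
  intro ms _
  unfold Spec_clean_up_boxes clean_up_boxes clean_up_boxes_alt
  have h : pvRowA = pvRowB :=
    funext fun l => (pvRowA_eq_pvSpec l).trans (pvRowB_eq_pvSpec l).symm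
  rw [h]
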